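-- pv_equiv track=rewrite | github.com/davidchim/Open-Anti-Browser | backend/services/chrome.py | _resolve_accept_language
-- ===== SOURCE A (Python) =====
-- def _normalize_language_value(language: str | None) -> str:
--     raw = str(language or "").strip()
--     if not raw:
--         return "en-US"
--     first = raw.split(",", 1)[0].strip()
--     if ";q=" in first:
--         first = first.split(";q=", 1)[0].strip()
--     return first or "en-US"
--
-- def _resolve_accept_language(accept_language: str | None, language: str) -> str:
--     requested_items = _parse_language_items(accept_language)
--     primary = _normalize_language_value(language or (requested_items[0] if requested_items else ""))
--     values: list[str] = [primary]
--
--     for item in requested_items: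
--         if item.lower() != primary.lower():
--             values.append(item)
--
--     root = primary.split("-", 1)[0].strip()
--     if root and root.lower() != primary.lower():
--         values.append(root)
--     if "en-us" not in {item.lower() for item in values}:
--         values.append("en-US")
--
--     unique_values: list[str] = []
--     seen: set[str] = set()
--     for item in values:
--         lowered = item.lower()
--         if item and lowered not in seen:
--             unique_values.append(item)
--             seen.add(lowered)
--
--     return ",".join(unique_values)
--
-- def _parse_language_items(value: str | None) -> list[str]:
--     items: list[str] = []
--     seen: set[str] = set()
--     for raw_item in str(value or "").split(","):
--         item = raw_item.strip()
--         if not item: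
--             continue
--         if ";q=" in item:
--             item = item.split(";q=", 1)[0].strip()
--         lowered = item.lower()
--         if not item or lowered in seen:
--             continue
--         items.append(item)
--         seen.add(lowered)
--     return items
-- ===== SOURCE B (Python) =====
-- def _normalize_language_value(language):
--     raw = str(language or "").strip()
--     if not raw:
--         return "en-US"
--     first = raw.split(",", 1)[0].strip()
--     if ";q=" in first:
--         first = first.split(";q=", 1)[0].strip()
--     return first or "en-US"
--
-- def _norm_item(raw_item):
--     item = raw_item.strip()
--     if ";q=" in item:
--         item = item.split(";q=", 1)[0].strip()
--     return item
--
-- def _dedup(items):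
--     # recursive first-occurrence nub: keep the head, drop its case-insensitive
--     # duplicates from the tail, recurse; no seen-set is maintained
--     if not items:
--         return []
--     head = items[0]
--     rest = [x for x in items[1:] if x.lower() != head.lower()]
--     return [head] + _dedup(rest)
--
-- def _resolve_accept_language(accept_language, language):
--     cleaned = [_norm_item(x) for x in str(accept_language or "").split(",")]
--     requested = _dedup([x for x in cleaned if x])
--     primary = _normalize_language_value(language or (requested[0] if requested else ""))
--     root = primary.split("-", 1)[0].strip()
--     candidates = [primary, *requested, root, "en-US"]
--     return ",".join(_dedup([c for c in candidates if c]))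
-- ===== Notes on version B (the rewrite author's own statement) =====
-- stated objective: alternative
-- what changed: B replaces both of A's seen-set scanning loops (the guarded values construction and the final dedup pass) by comprehensions feeding a recursive filter-based nub (_dedup) that keeps the head and recursively drops its case-insensitive duplicates from the tail, maintaining no seen set at all; A's conditional guards (item!=primary, root guard, en-us probe) disappear into the nub.
import Mathlib
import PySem

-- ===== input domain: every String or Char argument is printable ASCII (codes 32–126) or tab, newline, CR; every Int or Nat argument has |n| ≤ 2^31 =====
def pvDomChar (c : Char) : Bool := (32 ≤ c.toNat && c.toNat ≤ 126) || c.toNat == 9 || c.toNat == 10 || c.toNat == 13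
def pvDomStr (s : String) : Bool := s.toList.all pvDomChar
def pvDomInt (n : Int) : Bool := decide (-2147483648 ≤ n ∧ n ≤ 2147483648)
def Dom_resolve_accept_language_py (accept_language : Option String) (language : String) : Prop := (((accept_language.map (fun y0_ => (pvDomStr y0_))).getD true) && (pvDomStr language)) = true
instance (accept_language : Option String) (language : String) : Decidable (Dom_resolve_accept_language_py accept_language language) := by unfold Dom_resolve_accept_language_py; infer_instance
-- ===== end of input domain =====

-- B replaces A's two seen-set scanning loops by comprehensions feeding a recursive
-- filter-based nub (keep the head, drop its case-insensitive duplicates from the tail,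
-- recurse): no seen set, no conditional guards (objective: alternative; same result).

-- ===== PORT A =====
-- item.split(";q=", 1)[0].strip() applied when ";q=" occurs in item
def pvQsplit (item : String) : String :=
  if PySem.Str.isIn ";q=" item then
    PySem.Str.strip (((PySem.Str.splitMax? item ";q=" 1).getD []).headD "")
  else item

-- _normalize_language_value (both call sites pass a str, so the parameter is String)
def pvNormalize (language : String) : String :=
  let raw := PySem.Str.strip language
  if raw = "" then "en-US"
  else
    let first := PySem.Str.strip (((PySem.Str.splitMax? raw "," 1).getD []).headD "")
    let first := pvQsplit first
    if first = "" then "en-US" else first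

-- A's loop body `if item and lowered not in seen: append item; add lowered`
def pvDedupStep (acc : List String × PySem.Set String) (item : String) :
    List String × PySem.Set String :=
  if item ≠ "" ∧ PySem.Str.lower item ∉ acc.2 then
    (acc.1 ++ [item], PySem.Set.add acc.2 (PySem.Str.lower item))
  else acc

-- _parse_language_items
def pvParse (value : Option String) : List String :=
  (((PySem.Str.split? (value.getD "") ",").getD []).foldl
    (fun acc raw_item =>
      let item := PySem.Str.strip raw_item
      if item = "" then acc
      else pvDedupStep acc (pvQsplit item))
    ([], PySem.Set.ofList [])).1

def resolve_accept_language_py (accept_language : Option String) (language : String) : String :=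
  let requested := pvParse accept_language
  let primary := pvNormalize (if language = "" then requested.headD "" else language)
  let values := [primary]
  let values := requested.foldl
    (fun vs item => if PySem.Str.lower item ≠ PySem.Str.lower primary then vs ++ [item] else vs)
    values
  let root := PySem.Str.strip (((PySem.Str.splitMax? primary "-" 1).getD []).headD "")
  let values := if root ≠ "" ∧ PySem.Str.lower root ≠ PySem.Str.lower primary then values ++ [root] else values
  let values := if "en-us" ∉ PySem.Set.ofList (values.map PySem.Str.lower) then values ++ ["en-US"] else values
  PySem.Str.join "," ((values.foldl pvDedupStep ([], PySem.Set.ofList [])).1)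

-- ===== PORT B =====
-- _norm_item: strip, then drop the ;q= suffix
def pvNorm (raw_item : String) : String :=
  let item := PySem.Str.strip raw_item
  if PySem.Str.isIn ";q=" item then
    PySem.Str.strip (((PySem.Str.splitMax? item ";q=" 1).getD []).headD "")
  else item

-- _dedup: recursive first-occurrence nub, no seen set
def pvDedup : List String → List String
  | [] => []
  | h :: t => h :: pvDedup (t.filter (fun x => PySem.Str.lower x != PySem.Str.lower h))
  termination_by xs => xs.length
  decreasing_by simpa using Nat.lt_succ_of_le (List.length_filter_le _ _)

def resolve_accept_language_py_alt (accept_language : Option String) (language : String) : String :=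
  let cleaned := ((PySem.Str.split? (accept_language.getD "") ",").getD []).map pvNorm
  let requested := pvDedup (cleaned.filter (fun x => x != ""))
  let primary := pvNormalize (if language = "" then requested.headD "" else language)
  let root := PySem.Str.strip (((PySem.Str.splitMax? primary "-" 1).getD []).headD "")
  let candidates := (primary :: requested) ++ [root, "en-US"]
  PySem.Str.join "," (pvDedup (candidates.filter (fun x => x != "")))

-- ===== PRECONDITION & SPEC =====
def Spec_resolve_accept_language_py (accept_language : Option String) (language : String) (out : String) : Prop := out = resolve_accept_language_py_alt accept_language language
instance (accept_language : Option String) (language : String) (out : String) : Decidable (Spec_resolve_accept_language_py accept_language language out) := by unfold Spec_resolve_accept_language_py; infer_instance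

-- ===== CLAIM =====
def Claim_equal_resolve_accept_language_py : Prop := ∀ (accept_language : Option String) (language : String), Dom_resolve_accept_language_py accept_language language → Spec_resolve_accept_language_py accept_language language (resolve_accept_language_py accept_language language)

-- ===== LEMMAS AND PROOFS =====

-- pvNormalize never returns the empty string
lemma pvNormalize_ne_empty (s : String) : pvNormalize s ≠ "" := by
  unfold pvNormalize
  by_cases h1 : PySem.Str.strip s = ""
  · rw [if_pos h1]; decide
  · rw [if_neg h1]
    show (if pvQsplit (PySem.Str.strip (((PySem.Str.splitMax? (PySem.Str.strip s) "," 1).getD []).headD "")) = ""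
          then "en-US"
          else pvQsplit (PySem.Str.strip (((PySem.Str.splitMax? (PySem.Str.strip s) "," 1).getD []).headD ""))) ≠ ""
    split_ifs with h2
    · decide
    · exact h2

-- a skipped candidate (empty, or lowercase already seen) leaves the accumulator untouched
lemma pvDedupStep_skip {acc : List String × PySem.Set String} {item : String}
    (h : item = "" ∨ PySem.Str.lower item ∈ acc.2) : pvDedupStep acc item = acc := by
  unfold pvDedupStep
  rcases h with h | h
  · rw [if_neg]; rintro ⟨h1, -⟩; exact h1 h
  · rw [if_neg]; rintro ⟨-, h2⟩; exact h2 h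

-- the seen set only grows
lemma pvDedupStep_seen_mono {a : String} (acc : List String × PySem.Set String) (item : String)
    (h : a ∈ acc.2) : a ∈ (pvDedupStep acc item).2 := by
  unfold pvDedupStep
  split_ifs with hc
  · exact (PySem.Set.mem_add _ _ _).2 (Or.inl h)
  · exact h

lemma foldl_seen_mono {a : String} (xs : List String) (acc : List String × PySem.Set String)
    (h : a ∈ acc.2) : a ∈ (xs.foldl pvDedupStep acc).2 := by
  induction xs generalizing acc with
  | nil => exact h
  | cons x xs ih => exact ih _ (pvDedupStep_seen_mono acc x h)

-- dropping candidates whose lowercase is already seen does not change the dedup fold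
lemma foldl_dedup_filter (lp : String) (xs : List String) (acc : List String × PySem.Set String)
    (h : lp ∈ acc.2) :
    (xs.filter (fun i => PySem.Str.lower i != lp)).foldl pvDedupStep acc
      = xs.foldl pvDedupStep acc := by
  induction xs generalizing acc with
  | nil => rfl
  | cons x xs ih =>
    rw [List.filter_cons]
    by_cases hx : PySem.Str.lower x = lp
    · rw [if_neg (by simp [hx]), List.foldl_cons, pvDedupStep_skip (Or.inr (by rw [hx]; exact h))]
      exact ih acc h
    · rw [if_pos (by simp [hx]), List.foldl_cons, List.foldl_cons]
      exact ih (pvDedupStep acc x) (pvDedupStep_seen_mono acc x h)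

-- the seen set after a dedup fold = initial seen plus lowercase of the nonempty candidates
lemma foldl_seen_mem (a : String) (xs : List String) (acc : List String × PySem.Set String) :
    a ∈ (xs.foldl pvDedupStep acc).2 ↔ a ∈ acc.2 ∨ ∃ x ∈ xs, x ≠ "" ∧ PySem.Str.lower x = a := by
  induction xs generalizing acc with
  | nil => simp
  | cons x xs ih =>
    rw [List.foldl_cons]
    by_cases hx : x = "" ∨ PySem.Str.lower x ∈ acc.2
    · rw [pvDedupStep_skip hx, ih]
      constructor
      · rintro (h | ⟨y, hy, hy1, hy2⟩)
        · exact Or.inl h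
        · exact Or.inr ⟨y, List.mem_cons_of_mem _ hy, hy1, hy2⟩
      · rintro (h | ⟨y, hy, hy1, hy2⟩)
        · exact Or.inl h
        · rcases List.mem_cons.1 hy with rfl | hy'
          · rcases hx with hx | hx
            · exact absurd hx hy1
            · exact Or.inl (hy2 ▸ hx)
          · exact Or.inr ⟨y, hy', hy1, hy2⟩
    · rw [not_or] at hx
      have hstep : pvDedupStep acc x = (acc.1 ++ [x], PySem.Set.add acc.2 (PySem.Str.lower x)) := by
        unfold pvDedupStep; rw [if_pos ⟨hx.1, hx.2⟩]
      rw [hstep, ih]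
      constructor
      · rintro (h | ⟨y, hy, hy1, hy2⟩)
        · rcases (PySem.Set.mem_add _ _ _).1 h with h | h
          · exact Or.inl h
          · exact Or.inr ⟨x, List.mem_cons_self, hx.1, h.symm⟩
        · exact Or.inr ⟨y, List.mem_cons_of_mem _ hy, hy1, hy2⟩
      · rintro (h | ⟨y, hy, hy1, hy2⟩)
        · exact Or.inl ((PySem.Set.mem_add _ _ _).2 (Or.inl h))
        · rcases List.mem_cons.1 hy with rfl | hy'
          · exact Or.inl ((PySem.Set.mem_add _ _ _).2 (Or.inr hy2.symm))
          · exact Or.inr ⟨y, hy', hy1, hy2⟩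

-- A's guarded-values construction deduplicates to the flat candidate list
lemma pvMain (req : List String) (p root : String) (hp : p ≠ "") :
    (List.foldl pvDedupStep ([], PySem.Set.ofList [])
      (if "en-us" ∉ PySem.Set.ofList (List.map PySem.Str.lower (if root ≠ "" ∧ PySem.Str.lower root ≠ PySem.Str.lower p then (List.foldl (fun vs item => if PySem.Str.lower item ≠ PySem.Str.lower p then vs ++ [item] else vs) [p] req) ++ [root] else (List.foldl (fun vs item => if PySem.Str.lower item ≠ PySem.Str.lower p then vs ++ [item] else vs) [p] req)))
       then (if root ≠ "" ∧ PySem.Str.lower root ≠ PySem.Str.lower p then (List.foldl (fun vs item => if PySem.Str.lower item ≠ PySem.Str.lower p then vs ++ [item] else vs) [p] req) ++ [root] else (List.foldl (fun vs item => if PySem.Str.lower item ≠ PySem.Str.lower p then vs ++ [item] else vs) [p] req)) ++ ["en-US"] else (if root ≠ "" ∧ PySem.Str.lower root ≠ PySem.Str.lower p then (List.foldl (fun vs item => if PySem.Str.lower item ≠ PySem.Str.lower p then vs ++ [item] else vs) [p] req) ++ [root] else (List.foldl (fun vs item => if PySem.Str.lower item ≠ PySem.Str.lower p then vs ++ [item]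 else vs) [p] req)))).1
    = (List.foldl pvDedupStep ([], PySem.Set.ofList []) ((p :: req) ++ [root, "en-US"])).1 := by
  have hvals : (List.foldl (fun vs item => if PySem.Str.lower item ≠ PySem.Str.lower p then vs ++ [item] else vs) [p] req)
      = [p] ++ List.filter (fun i => PySem.Str.lower i != PySem.Str.lower p) req := by
    have hfun : (fun (vs : List String) (item : String) => if PySem.Str.lower item ≠ PySem.Str.lower p then vs ++ [item] else vs)
        = (fun vs item => if (PySem.Str.lower item != PySem.Str.lower p) = true then vs ++ [id item] else vs) := by
      funext vs item
      by_cases h : PySem.Str.lower item = PySem.Str.lower p <;> simp [h]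
    rw [hfun, PySem.List.foldl_append_if, List.map_id]
  rw [hvals]
  have hif : (if root ≠ "" ∧ PySem.Str.lower root ≠ PySem.Str.lower p then ([p] ++ List.filter (fun i => PySem.Str.lower i != PySem.Str.lower p) req) ++ [root] else ([p] ++ List.filter (fun i => PySem.Str.lower i != PySem.Str.lower p) req))
      = (([p] ++ List.filter (fun i => PySem.Str.lower i != PySem.Str.lower p) req) ++ (if root ≠ "" ∧ PySem.Str.lower root ≠ PySem.Str.lower p then [root] else [])) := by
    split_ifs <;> simp
  rw [hif]
  have hlp1 : PySem.Str.lower p ∈ (pvDedupStep ([], PySem.Set.ofList []) p).2 := by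
    unfold pvDedupStep
    rw [if_pos ⟨hp, by simp⟩]
    exact (PySem.Set.mem_add (([], PySem.Set.ofList []) : List String × PySem.Set String).2
      (PySem.Str.lower p) (PySem.Str.lower p)).2 (Or.inr rfl)
  have hlp2 : PySem.Str.lower p ∈ (List.foldl pvDedupStep (pvDedupStep ([], PySem.Set.ofList []) p) req).2 := foldl_seen_mono req _ hlp1
  have hpref : List.foldl pvDedupStep ([], PySem.Set.ofList []) ([p] ++ List.filter (fun i => PySem.Str.lower i != PySem.Str.lower p) req)
      = (List.foldl pvDedupStep (pvDedupStep ([], PySem.Set.ofList []) p) req) := by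
    rw [List.foldl_append]
    simp only [List.foldl_cons, List.foldl_nil]
    exact foldl_dedup_filter (PySem.Str.lower p) req _ hlp1
  have hs3 : List.foldl pvDedupStep ([], PySem.Set.ofList []) (([p] ++ List.filter (fun i => PySem.Str.lower i != PySem.Str.lower p) req) ++ (if root ≠ "" ∧ PySem.Str.lower root ≠ PySem.Str.lower p then [root] else []))
      = pvDedupStep (List.foldl pvDedupStep (pvDedupStep ([], PySem.Set.ofList []) p) req) root := by
    rw [List.foldl_append, hpref]
    split_ifs with hg
    · rfl
    · rw [not_and_or, not_not, not_ne_iff] at hg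
      rw [List.foldl_nil]
      rcases hg with hg | hg
      · exact (pvDedupStep_skip (Or.inl hg)).symm
      · exact (pvDedupStep_skip (Or.inr (by rw [hg]; exact hlp2))).symm
  have hen : "en-us" ∈ PySem.Set.ofList (List.map PySem.Str.lower (([p] ++ List.filter (fun i => PySem.Str.lower i != PySem.Str.lower p) req) ++ (if root ≠ "" ∧ PySem.Str.lower root ≠ PySem.Str.lower p then [root] else [])))
      → "en-us" ∈ (pvDedupStep (List.foldl pvDedupStep (pvDedupStep ([], PySem.Set.ofList []) p) req) root).2 := by
    intro h
    rw [← hs3, foldl_seen_mem]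
    rcases List.mem_map.1 ((PySem.Set.mem_ofList _ _).1 h) with ⟨x, hx, hlx⟩
    refine Or.inr ⟨x, hx, ?_, hlx⟩
    intro hxe
    rw [hxe] at hlx
    exact absurd hlx (by decide)
  have hB : List.foldl pvDedupStep ([], PySem.Set.ofList []) ((p :: req) ++ [root, "en-US"])
      = pvDedupStep (pvDedupStep (List.foldl pvDedupStep (pvDedupStep ([], PySem.Set.ofList []) p) req) root) "en-US" := by
    rw [List.foldl_append]
    rfl
  rw [hB]
  by_cases hmem : "en-us" ∈ PySem.Set.ofList (List.map PySem.Str.lower (([p] ++ List.filter (fun i => PySem.Str.lower i != PySem.Str.lower p) req) ++ (if root ≠ "" ∧ PySem.Str.lower root ≠ PySem.Str.lower p then [root] else [])))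
  · rw [if_neg (fun hq => hq hmem), hs3]
    have hsk : pvDedupStep (pvDedupStep (List.foldl pvDedupStep (pvDedupStep ([], PySem.Set.ofList []) p) req) root) "en-US"
        = pvDedupStep (List.foldl pvDedupStep (pvDedupStep ([], PySem.Set.ofList []) p) req) root :=
      pvDedupStep_skip (Or.inr (by
        rw [show PySem.Str.lower "en-US" = "en-us" from by decide]
        exact hen hmem))
    rw [hsk]
  · rw [if_pos hmem, List.foldl_append, hs3]
    rfl

-- the seen-set fold over any list = its recursive filter-based nub (skipping empties)
lemma fold_eq_nub (xs : List String) (acc : List String) (S : PySem.Set String) :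
    (xs.foldl pvDedupStep (acc, S)).1
      = acc ++ pvDedup (xs.filter (fun x => x != "" && !(decide (PySem.Str.lower x ∈ S)))) := by
  induction xs generalizing acc S with
  | nil => simp [pvDedup]
  | cons x xs ih =>
    rw [List.foldl_cons, List.filter_cons]
    by_cases hx : x = "" ∨ PySem.Str.lower x ∈ S
    · rw [pvDedupStep_skip hx, if_neg (by rcases hx with h | h <;> simp [h])]
      exact ih acc S
    · rw [not_or] at hx
      have hstep : pvDedupStep (acc, S) x
          = (acc ++ [x], PySem.Set.add S (PySem.Str.lower x)) := by
        unfold pvDedupStep; rw [if_pos ⟨hx.1, hx.2⟩]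
      rw [hstep, if_pos (by simp [hx.1, hx.2]), ih, pvDedup]
      have hfil : (xs.filter (fun y => y != "" && !(decide (PySem.Str.lower y ∈ S)))).filter
            (fun y => PySem.Str.lower y != PySem.Str.lower x)
          = xs.filter (fun y => y != "" && !(decide (PySem.Str.lower y ∈ PySem.Set.add S (PySem.Str.lower x)))) := by
        rw [List.filter_filter]
        apply List.filter_congr; intro y _
        by_cases h1 : y = "" <;> by_cases h2 : PySem.Str.lower y ∈ S <;>
          by_cases h3 : PySem.Str.lower y = PySem.Str.lower x <;>
          simp [h1, h2, h3, PySem.Set.mem_add]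
      rw [hfil]; simp

-- the empty-seen fold = the plain nonempty-filter nub
lemma fold_eq_nub_empty (xs : List String) :
    (xs.foldl pvDedupStep ([], PySem.Set.ofList [])).1
      = pvDedup (xs.filter (fun x => x != "")) := by
  rw [fold_eq_nub, List.nil_append]
  congr 1
  apply List.filter_congr; intro x _
  simp [PySem.Set.ofList]

-- A's parse fold = the fold of pvDedupStep over the normalized items
lemma parse_fold_eq (raws : List String) (acc : List String × PySem.Set String) :
    raws.foldl (fun acc raw_item =>
      let item := PySem.Str.strip raw_item
      if item = "" then acc else pvDedupStep acc (pvQsplit item)) acc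
    = (raws.map pvNorm).foldl pvDedupStep acc := by
  induction raws generalizing acc with
  | nil => rfl
  | cons r rs ih =>
    rw [List.map_cons, List.foldl_cons, List.foldl_cons]
    have hstep : (if PySem.Str.strip r = "" then acc else pvDedupStep acc (pvQsplit (PySem.Str.strip r)))
        = pvDedupStep acc (pvNorm r) := by
      by_cases h : PySem.Str.strip r = ""
      · rw [if_pos h]
        have hnorm : pvNorm r = "" := by
          unfold pvNorm; rw [h]; decide
        rw [hnorm, pvDedupStep_skip (Or.inl rfl)]
      · rw [if_neg h]; rfl
    show List.foldl (fun acc raw_item =>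
        let item := PySem.Str.strip raw_item
        if item = "" then acc else pvDedupStep acc (pvQsplit item))
        (if PySem.Str.strip r = "" then acc else pvDedupStep acc (pvQsplit (PySem.Str.strip r))) rs
      = List.foldl pvDedupStep (pvDedupStep acc (pvNorm r)) (List.map pvNorm rs)
    rw [hstep]
    exact ih _

-- pvParse computes B's requested list
lemma parse_eq_alt (v : Option String) :
    pvParse v = pvDedup ((((PySem.Str.split? (v.getD "") ",").getD []).map pvNorm).filter (fun x => x != "")) := by
  unfold pvParse
  rw [parse_fold_eq, fold_eq_nub_empty]

-- ===== VERDICT =====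
theorem resolve_accept_language_py_spec : Claim_equal_resolve_accept_language_py := by
  intro accept_language language _
  unfold Spec_resolve_accept_language_py
  simp only [resolve_accept_language_py, resolve_accept_language_py_alt]
  rw [← parse_eq_alt]
  rw [pvMain (pvParse accept_language)
      (pvNormalize (if language = "" then (pvParse accept_language).headD "" else language))
      (PySem.Str.strip (((PySem.Str.splitMax? (pvNormalize (if language = "" then (pvParse accept_language).headD "" else language)) "-" 1).getD []).headD ""))
      (pvNormalize_ne_empty _)]
  rw [fold_eq_nub_empty]
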